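-- pv_equiv track=rewrite | github.com/fineanmol/Hacktoberfest2024 | Program's_Contributed_By_Contributors/Python_Programs/math_algorithms/DragonCurve.py | generate
-- ===== SOURCE A (Python) =====
-- ruleInput = ['X', 'Y']
--
-- ruleOutput = ["X+YF+", "-FX-Y"]
--
-- start = "FX"
--
-- def generate(iteration):
-- 	result = start
-- 	temp = ""
-- 	for i in range(iteration):
-- 		for j in range(len(result)):
-- 			for k in range(len(ruleInput)):
-- 				if result[j] == ruleInput[k]:
-- 					temp += ruleOutput[k]
-- 					break
-- 				if k == len(ruleInput)-1:
-- 					temp += result[j]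
-- 		result = temp
-- 		temp = ""
-- 	return result
-- ===== SOURCE B (Python) =====
-- ruleInput = ['X', 'Y']
--
-- ruleOutput = ["X+YF+", "-FX-Y"]
--
-- start = "FX"
--
-- def _rule(c):
--     if c == 'X':
--         return "X+YF+"
--     if c == 'Y':
--         return "-FX-Y"
--     return c
--
-- def _expand(c, n):
--     if n <= 0:
--         return c
--     return ''.join(_expand(d, n - 1) for d in _rule(c))
--
-- def generate(iteration):
--     return ''.join(_expand(c, iteration) for c in start)
-- ===== Notes on version B (the rewrite author's own statement) =====
-- stated objective: alternative
-- what changed: Replaces the breadth-first whole-string rewriting loop (rebuild the entire string each of N iterations via nested index loops over the rule table) with a context-free depth-first recursion that expands each start character independently to full depth.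
import Mathlib
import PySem

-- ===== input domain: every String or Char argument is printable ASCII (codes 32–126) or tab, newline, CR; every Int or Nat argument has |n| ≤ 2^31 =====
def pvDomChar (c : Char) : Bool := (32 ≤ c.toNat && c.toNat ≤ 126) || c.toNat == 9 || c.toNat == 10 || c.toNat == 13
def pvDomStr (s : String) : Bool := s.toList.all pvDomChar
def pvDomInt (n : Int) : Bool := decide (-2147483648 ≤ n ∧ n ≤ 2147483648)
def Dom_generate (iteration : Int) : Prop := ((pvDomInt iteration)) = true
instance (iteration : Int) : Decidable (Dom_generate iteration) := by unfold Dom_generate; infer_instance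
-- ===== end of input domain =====

-- B replaces A's breadth-first whole-string rewriting loop by a depth-first per-character
-- recursive expansion (alternative decomposition; same return value, no speed claim).

-- ===== PORT A =====
-- module constants
def generateRuleInput : List Char := ['X', 'Y']
def generateRuleOutput : List String := ["X+YF+", "-FX-Y"]
def generateStart : String := "FX"

-- inner `for k in range(len(ruleInput))` loop with its break, over the remaining k values
def generateInnerK (c : Char) : String → List Int → String
  | temp, [] => temp
  | temp, k :: ks =>
      if c = PySem.List.pyGetD generateRuleInput k ' ' then
        temp ++ PySem.List.pyGetD generateRuleOutput k ""          -- temp += ruleOutput[k]; break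
      else
        let temp' := if k = PySem.List.len generateRuleInput - 1 then temp.push c else temp
        generateInnerK c temp' ks

-- one outer iteration: the `for j in range(len(result))` loop building temp from ""
def generateStepA (result : String) : String :=
  (PySem.List.pyRange 0 (PySem.Str.len result) 1).foldl
    (fun temp j =>
      match PySem.Str.pyGet? result j with
      | none => temp                                               -- unreachable: j in range
      | some c => generateInnerK c temp
          (PySem.List.pyRange 0 (PySem.List.len generateRuleInput) 1))
    ""

def generate (iteration : Int) : String :=
  (PySem.List.pyRange 0 iteration 1).foldl (fun result _ => generateStepA result) generateStart

-- ===== PORT B =====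
def generateRule (c : Char) : String :=
  if c = 'X' then "X+YF+"
  else if c = 'Y' then "-FX-Y"
  else String.ofList [c]

def generateExpand (c : Char) (n : Int) : String :=
  if n ≤ 0 then String.ofList [c]
  else PySem.Str.join "" ((generateRule c).toList.map (fun d => generateExpand d (n - 1)))
termination_by n.toNat
decreasing_by omega

def generate_alt (iteration : Int) : String :=
  PySem.Str.join "" (generateStart.toList.map (fun c => generateExpand c iteration))

-- ===== PRECONDITION & SPEC =====
def Spec_generate (iteration : Int) (out : String) : Prop := out = generate_alt iteration
instance (iteration : Int) (out : String) : Decidable (Spec_generate iteration out) := by unfold Spec_generate; infer_instance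

-- ===== CLAIM (what is proved, stated in full; the proofs are below) =====
def Claim_equal_generate : Prop := ∀ (iteration : Int), Dom_generate iteration → Spec_generate iteration (generate iteration)

-- ===== LEMMAS AND PROOFS =====

-- the substitution rule at list-of-chars level
def ruleL (c : Char) : List Char :=
  if c = 'X' then "X+YF+".toList else if c = 'Y' then "-FX-Y".toList else [c]

theorem toList_rule (c : Char) : (generateRule c).toList = ruleL c := by
  by_cases hX : c = 'X' <;> by_cases hY : c = 'Y' <;>
    simp [generateRule, ruleL, hX, hY, String.toList_ofList]

theorem innerK_eval (c : Char) (temp : String) :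
    generateInnerK c temp (PySem.List.pyRange 0 (PySem.List.len generateRuleInput) 1)
      = temp ++ String.ofList (ruleL c) := by
  have h : PySem.List.pyRange 0 (PySem.List.len generateRuleInput) 1 = [0, 1] := by decide
  rw [h]
  by_cases hX : c = 'X' <;> by_cases hY : c = 'Y' <;>
    simp [generateInnerK, ruleL, hX, hY, PySem.List.pyGetD, PySem.List.pyGet?,
      PySem.List.pyIdx?, generateRuleInput, generateRuleOutput, PySem.List.len] <;>
    apply String.toList_inj.mp <;> simp [String.toList_ofList]

theorem foldl_range_get (f : String → Char → String) :
    ∀ (l : List Char) (init : String),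
      (List.range l.length).foldl
        (fun t k => match l[k]? with | none => t | some c => f t c) init
      = l.foldl f init := by
  intro l
  induction l with
  | nil => intro init; simp
  | cons a l ih =>
      intro init
      have : List.range (a :: l).length = 0 :: (List.range l.length).map (· + 1) := by
        simp [List.range_succ_eq_map]
      rw [this]
      simp only [List.foldl_cons, List.foldl_map]
      simpa using ih (f init a)

theorem foldl_append_rule :
    ∀ (l : List Char) (init : String),
      (l.foldl (fun t c => t ++ String.ofList (ruleL c)) init).toList
        = init.toList ++ l.flatMap ruleL := by
  intro l
  induction l with
  | nil => intro init; simp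
  | cons a l ih =>
      intro init
      simp only [List.foldl_cons, List.flatMap_cons]
      rw [ih]
      simp [String.toList_ofList]

theorem stepA_toList (s : String) :
    (generateStepA s).toList = s.toList.flatMap ruleL := by
  unfold generateStepA
  rw [show PySem.Str.len s = ((s.toList.length : Nat) : Int) by simp,
      PySem.List.pyRange_zero_nat]
  simp only [List.foldl_map, PySem.Str.pyGet?_natCast]
  rw [foldl_range_get (fun t c => generateInnerK c t
        (PySem.List.pyRange 0 (PySem.List.len generateRuleInput) 1)) s.toList ""]
  rw [show (fun t c => generateInnerK c t
        (PySem.List.pyRange 0 (PySem.List.len generateRuleInput) 1))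
      = (fun (t : String) (c : Char) => t ++ String.ofList (ruleL c)) from
      funext fun t => funext fun c => innerK_eval c t]
  simpa using foldl_append_rule s.toList ""

theorem gen_iterate (iteration : Int) :
    generate iteration = generateStepA^[iteration.toNat] generateStart := by
  unfold generate
  rw [PySem.List.pyRange_one]
  have h : ∀ {α : Type} (l : List α) (s : String),
      l.foldl (fun r _ => generateStepA r) s = generateStepA^[l.length] s := by
    intro α l
    induction l with
    | nil => intro s; simp
    | cons a l ih =>
        intro s
        simp [Function.iterate_succ_apply, ih]
  rw [h]
  simp

theorem expand_nonpos (c : Char) (n : Int) (h : n ≤ 0) :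
    generateExpand c n = String.ofList [c] := by
  rw [generateExpand]; simp [h]

theorem joinChars_nil : ∀ (ps : List (List Char)), PySem.Chars.join [] ps = ps.flatten
  | [] => by simp [PySem.Chars.join, List.intercalate, List.intersperse]
  | [a] => by simp [PySem.Chars.join, List.intercalate, List.intersperse]
  | a :: b :: t => by
      simp only [PySem.Chars.join, List.intercalate, List.intersperse, List.flatten_cons,
        List.map_cons] at *
      have := joinChars_nil (b :: t)
      simp [PySem.Chars.join, List.intercalate] at this
      simp [this]

theorem joinStr_toList (parts : List String) :
    (PySem.Str.join "" parts).toList = parts.flatMap String.toList := by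
  simp only [PySem.Str.toList_join]
  rw [show ("" : String).toList = [] from rfl, joinChars_nil, List.flatMap_def]

theorem expand_pos_toList (c : Char) (n : Int) (h : 0 < n) :
    (generateExpand c n).toList = (ruleL c).flatMap (fun d => (generateExpand d (n - 1)).toList) := by
  rw [generateExpand]
  rw [if_neg (by omega)]
  rw [joinStr_toList, List.flatMap_map, toList_rule]

theorem iterate_expand (m : Nat) :
    ∀ (s : String),
      (generateStepA^[m] s).toList
        = s.toList.flatMap (fun c => (generateExpand c (m : Int)).toList) := by
  induction m with
  | zero =>
      intro s
      simp only [Function.iterate_zero, id_eq, Nat.cast_zero,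
        expand_nonpos _ _ (le_refl (0 : Int)), String.toList_ofList]
      exact (List.flatMap_singleton' s.toList).symm
  | succ m ih =>
      intro s
      rw [Function.iterate_succ_apply, ih (generateStepA s), stepA_toList,
        List.flatMap_assoc]
      congr 1
      funext c
      rw [show ((m + 1 : Nat) : Int) = (m : Int) + 1 by push_cast; ring,
        expand_pos_toList c ((m : Int) + 1) (by omega)]
      norm_num

theorem expand_toNat (c : Char) (n : Int) :
    generateExpand c n = generateExpand c ((n.toNat : Nat) : Int) := by
  by_cases h : n ≤ 0
  · rw [expand_nonpos _ _ h, expand_nonpos]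
    omega
  · rw [Int.toNat_of_nonneg (by omega)]

-- ===== VERDICT (by name: the statement is the Claim_ definition above) =====
theorem generate_spec : Claim_equal_generate := by
  intro iteration _
  unfold Spec_generate
  apply String.toList_inj.mp
  rw [gen_iterate, iterate_expand]
  unfold generate_alt
  rw [joinStr_toList, List.flatMap_map]
  congr 1
  funext c
  rw [← expand_toNat]
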